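-- pv_equiv track=rewrite | github.com/chokun17872/Computer-Programming-for-Computer-Engineers | Open files & List manipulation/16.py | solve
-- ===== SOURCE A (Python) =====
-- def check_chain(chain, other):
--     count = 0
--     for i in range(len(chain)):
--         if chain[i] != other[i]:
--             count += 1
--     if count <= 2:
--         return True
--     return False
--
-- def solve(text):
--     chain_cnt = 1
--     mx_length = 0
--     length = 1
--     for i in range(len(text)-1):
--         if check_chain(text[i], text[i+1]) == False:
--             chain_cnt += 1
--             length = 1
--         else:
--             length += 1
--             mx_length = max(mx_length, length)
--     return chain_cnt, mx_length
-- ===== SOURCE B (Python) =====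
-- def solve(text):
--     # one pass builds the table of adjacent-pair similarities, then
--     # chain count and longest run are read off the table
--     sims = []
--     for i in range(len(text) - 1):
--         a, b = text[i], text[i + 1]
--         diffs = 0
--         for j in range(len(a)):
--             diffs += a[j] != b[j]
--         sims.append(diffs <= 2)
--     chain_cnt = 1 + sims.count(False)
--     best = run = 0
--     for s in sims:
--         run = run + 1 if s else 0
--         if run > best:
--             best = run
--     mx_length = best + 1 if best else 0
--     return chain_cnt, mx_length
-- ===== Notes on version B (the rewrite author's own statement) =====
-- stated objective: alternative
-- what changed: B first materialises the per-pair similarity table, then derives chain_cnt as 1 + count(False) and mx_length from the longest run of True, instead of A's single loop threading three counters.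
import Mathlib
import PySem

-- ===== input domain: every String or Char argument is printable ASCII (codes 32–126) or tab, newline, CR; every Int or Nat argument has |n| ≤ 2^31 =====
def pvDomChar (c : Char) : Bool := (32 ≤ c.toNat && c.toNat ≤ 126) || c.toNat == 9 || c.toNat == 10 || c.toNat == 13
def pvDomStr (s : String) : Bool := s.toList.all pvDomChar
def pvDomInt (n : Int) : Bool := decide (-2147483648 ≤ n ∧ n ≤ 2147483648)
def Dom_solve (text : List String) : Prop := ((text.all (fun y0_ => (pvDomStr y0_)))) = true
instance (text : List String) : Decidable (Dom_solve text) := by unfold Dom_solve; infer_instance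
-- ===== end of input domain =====

-- B builds the similarity table first and reads both answers off it; same cost, different decomposition.
-- Both A and B raise IndexError when some text[i] is longer than text[i+1]; Pre_ excludes exactly those inputs.

-- ===== PORT A =====
-- chain[i]/other[i] are in range for every input Pre_solve admits, so .getD is exact there
def checkChain (chain other : String) : Bool :=
  let count : Int :=
    (List.range chain.toList.length).foldl
      (fun count i => if chain.toList.getD i ' ' ≠ other.toList.getD i ' ' then count + 1 else count) 0
  if count ≤ 2 then true else false

def solve (text : List String) : Int × Int :=
  let st :=
    (List.range (text.length - 1)).foldl
      (fun (st : Int × Int × Int) i =>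
        let (chain_cnt, mx_length, length) := st
        if checkChain (text.getD i "") (text.getD (i + 1) "") = false then
          (chain_cnt + 1, mx_length, 1)
        else
          (chain_cnt, max mx_length (length + 1), length + 1))
      (1, 0, 1)
  (st.1, st.2.1)

-- ===== PORT B =====
def similarB (a b : String) : Bool :=
  decide (((List.range a.toList.length).foldl
      (fun diffs j => diffs + (if a.toList.getD j ' ' ≠ b.toList.getD j ' ' then 1 else 0)) (0 : Int)) ≤ 2)

def solve_alt (text : List String) : Int × Int :=
  let sims := (List.range (text.length - 1)).map
    (fun i => similarB (text.getD i "") (text.getD (i + 1) ""))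
  let chain_cnt : Int := 1 + sims.count false
  let best := (sims.foldl
      (fun (p : Nat × Nat) s =>
        let run := if s then p.2 + 1 else 0
        (max p.1 run, run)) (0, 0)).1
  (chain_cnt, if best = 0 then 0 else (best : Int) + 1)

-- ===== PRECONDITION & SPEC =====
-- excludes exactly the inputs where Python A raises IndexError (an element longer than its successor)
def Pre_solve (text : List String) : Prop :=
  ∀ i ∈ List.range (text.length - 1),
    (text.getD i "").toList.length ≤ (text.getD (i + 1) "").toList.length
instance (text : List String) : Decidable (Pre_solve text) := by unfold Pre_solve; infer_instance

def pvWitness_solve : List String := ["abcd", "abce", "xyzw", "xyzwq"]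

def Spec_solve (text : List String) (out : Int × Int) : Prop := out = solve_alt text
instance (text : List String) (out : Int × Int) : Decidable (Spec_solve text out) := by unfold Spec_solve; infer_instance

-- ===== CLAIM (what is proved, stated in full; the proofs are below) =====
def Claim_equal_solve : Prop := ∀ (text : List String), Dom_solve text → Pre_solve text → Spec_solve text (solve text)

-- ===== LEMMAS AND PROOFS =====

theorem count_fold_eq (p : Nat → Prop) [DecidablePred p] : ∀ (l : List Nat) (c : Int),
    l.foldl (fun count i => if p i then count + 1 else count) c
      = l.foldl (fun diffs j => diffs + (if p j then 1 else 0)) c := by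
  intro l
  induction l with
  | nil => intro c; rfl
  | cons x xs ih => intro c; simp only [List.foldl_cons]; rw [ih]; by_cases h : p x <;> simp [h]

theorem checkChain_eq (a b : String) : checkChain a b = similarB a b := by
  unfold checkChain similarB
  rw [count_fold_eq (fun i => a.toList.getD i ' ' ≠ b.toList.getD i ' ')]
  by_cases h : ((List.range a.toList.length).foldl
      (fun diffs j => diffs + (if a.toList.getD j ' ' ≠ b.toList.getD j ' ' then 1 else 0)) (0 : Int)) ≤ 2 <;>
    simp

def stepA : (Int × Int × Int) → Bool → (Int × Int × Int) :=
  fun st s =>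
    let (chain_cnt, mx_length, length) := st
    if s = false then (chain_cnt + 1, mx_length, 1)
    else (chain_cnt, max mx_length (length + 1), length + 1)

def stepB : (Nat × Nat) → Bool → (Nat × Nat) :=
  fun p s =>
    let run := if s then p.2 + 1 else 0
    (max p.1 run, run)

theorem loop_eq : ∀ (S : List Bool) (cc mx len : Int) (best run : Nat),
    len = (run : Int) + 1 → mx = (if best = 0 then 0 else (best : Int) + 1) →
    (S.foldl stepA (cc, mx, len)).1 = cc + S.count false ∧
    (S.foldl stepA (cc, mx, len)).2.1 =
      (if (S.foldl stepB (best, run)).1 = 0 then 0 else ((S.foldl stepB (best, run)).1 : Int) + 1) := by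
  intro S
  induction S with
  | nil =>
    intro cc mx len best run hlen hmx
    simpa using hmx
  | cons s S ih =>
    intro cc mx len best run hlen hmx
    cases s with
    | false =>
      simp only [List.foldl_cons]
      rw [show stepA (cc, mx, len) false = (cc + 1, mx, 1) from rfl,
          show stepB (best, run) false = (best, 0) from by simp [stepB]]
      have h := ih (cc + 1) mx 1 best 0 (by norm_num) hmx
      refine ⟨?_, h.2⟩
      rw [h.1]
      simp
      ring
    | true =>
      simp only [List.foldl_cons]
      rw [show stepA (cc, mx, len) true = (cc, max mx (len + 1), len + 1) from rfl,
          show stepB (best, run) true = (max best (run + 1), run + 1) from rfl]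
      have hmx' : max mx (len + 1) = (if max best (run + 1) = 0 then 0 else ((max best (run + 1) : Nat) : Int) + 1) := by
        have h1 : max best (run + 1) ≠ 0 := by positivity
        rw [if_neg h1]
        subst hlen
        by_cases h0 : best = 0
        · subst h0; rw [if_pos rfl] at hmx; subst hmx
          rw [Nat.zero_max, max_eq_right (by positivity : (0 : Int) ≤ (run : Int) + 1 + 1)]
          push_cast
          ring
        · rw [if_neg h0] at hmx; subst hmx
          rcases Nat.le_total best (run + 1) with h | h
          · rw [Nat.max_eq_right h]; push_cast; omega
          · rw [Nat.max_eq_left h]; omega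
      have h := ih cc (max mx (len + 1)) (len + 1) (max best (run + 1)) (run + 1) (by omega) hmx'
      refine ⟨?_, h.2⟩
      rw [h.1]
      simp

theorem solve_eq_alt (text : List String) : solve text = solve_alt text := by
  unfold solve solve_alt
  set sims := (List.range (text.length - 1)).map
    (fun i => similarB (text.getD i "") (text.getD (i + 1) "")) with hs
  have hfold :
      (List.range (text.length - 1)).foldl
        (fun (st : Int × Int × Int) i =>
          let (chain_cnt, mx_length, length) := st
          if checkChain (text.getD i "") (text.getD (i + 1) "") = false then
            (chain_cnt + 1, mx_length, 1)
          else
            (chain_cnt, max mx_length (length + 1), length + 1))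
        (1, 0, 1)
      = sims.foldl stepA (1, 0, 1) := by
    rw [hs, List.foldl_map]
    congr 1
    funext st i
    obtain ⟨cc, mx, len⟩ := st
    simp only [checkChain_eq, stepA]
  have h := loop_eq sims 1 0 1 0 0 (by norm_num) (by norm_num)
  simp only [hfold]
  exact Prod.ext (by simpa [Int.add_comm] using h.1) (by simpa using h.2)

-- ===== VERDICT (by name: the statement is the Claim_ definition above) =====
theorem solve_spec : Claim_equal_solve := by
  intro text _ _
  unfold Spec_solve
  exact solve_eq_alt text
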